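-- pv_equiv track=rewrite | github.com/min1378/-algorithm | grep/1.py | solution
-- ===== SOURCE A (Python) =====
-- def solution(day, k):
--     first_day = day
--     days_month = [31, 28, 31, 30, 31, 30, 31, 31, 30, 31, 30, 31]
--     answer = []
--     diff = k-1
--     for days in days_month:
--         if ((first_day + diff)% 7 == 5 or (first_day + diff)% 7 == 6):
--             answer.append(1)
--         else:
--             answer.append(0)
--         first_day = (first_day + days) % 7
--
--     return answer
-- ===== SOURCE B (Python) =====
-- # B: the whole answer depends only on the weekday class w = (day + k - 1) % 7,
-- # so precompute the 7 possible answer rows once and answer by a single table lookup.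
-- _ROWS = [
--     [0, 0, 0, 1, 0, 0, 1, 0, 1, 0, 0, 1],
--     [0, 0, 0, 0, 0, 1, 0, 0, 1, 0, 0, 1],
--     [0, 1, 1, 0, 0, 1, 0, 0, 0, 0, 1, 0],
--     [0, 1, 1, 0, 0, 0, 0, 1, 0, 0, 1, 0],
--     [0, 0, 0, 0, 1, 0, 0, 1, 0, 0, 0, 0],
--     [1, 0, 0, 0, 1, 0, 0, 0, 0, 1, 0, 0],
--     [1, 0, 0, 1, 0, 0, 1, 0, 0, 1, 0, 0],
-- ]
--
-- def solution(day, k):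
--     return list(_ROWS[(day + k - 1) % 7])
-- ===== Notes on version B (the rewrite author's own statement) =====
-- stated objective: alternative
-- what changed: B does no per-month weekday arithmetic at all: it computes the single weekday class w = (day+k-1) % 7 once and returns the matching row of a precomputed 7-row answer table, replacing A's 12-step loop with a carried mod-7 accumulator by one mod and one table lookup.
import Mathlib
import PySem

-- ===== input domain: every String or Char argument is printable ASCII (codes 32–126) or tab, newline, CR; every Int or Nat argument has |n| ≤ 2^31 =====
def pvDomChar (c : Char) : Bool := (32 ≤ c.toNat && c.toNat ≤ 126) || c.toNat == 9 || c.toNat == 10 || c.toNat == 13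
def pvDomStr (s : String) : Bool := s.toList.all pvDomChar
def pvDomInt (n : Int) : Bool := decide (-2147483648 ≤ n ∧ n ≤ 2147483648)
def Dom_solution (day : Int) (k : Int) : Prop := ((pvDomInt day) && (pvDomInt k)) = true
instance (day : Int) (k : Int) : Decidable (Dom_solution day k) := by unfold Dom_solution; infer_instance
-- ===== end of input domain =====

-- ===== PORT A =====
-- B replaces A's 12-step loop with a carried mod-7 accumulator by one mod and a lookup
-- in a precomputed 7-row answer table (objective: alternative).
def solution (day : Int) (k : Int) : List Int :=
  let days_month : List Int := [31, 28, 31, 30, 31, 30, 31, 31, 30, 31, 30, 31]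
  let diff := k - 1
  (days_month.foldl (fun (st : Int × List Int) days =>
      (PySem.Int.mod (st.1 + days) 7,
       if PySem.Int.mod (st.1 + diff) 7 = 5 ∨ PySem.Int.mod (st.1 + diff) 7 = 6 then
         st.2 ++ [1]
       else
         st.2 ++ [0]))
    (day, [])).2

-- ===== PORT B =====
-- the index (day+k-1) % 7 is always in range 0..6, so Python's _ROWS[w] never raises;
-- ported with pyGetD (default never used).
def solution_alt (day : Int) (k : Int) : List Int :=
  let rows : List (List Int) :=
    [[0, 0, 0, 1, 0, 0, 1, 0, 1, 0, 0, 1],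
     [0, 0, 0, 0, 0, 1, 0, 0, 1, 0, 0, 1],
     [0, 1, 1, 0, 0, 1, 0, 0, 0, 0, 1, 0],
     [0, 1, 1, 0, 0, 0, 0, 1, 0, 0, 1, 0],
     [0, 0, 0, 0, 1, 0, 0, 1, 0, 0, 0, 0],
     [1, 0, 0, 0, 1, 0, 0, 0, 0, 1, 0, 0],
     [1, 0, 0, 1, 0, 0, 1, 0, 0, 1, 0, 0]]
  PySem.List.pyGetD rows (PySem.Int.mod (day + k - 1) 7) []

-- ===== PRECONDITION & SPEC =====
def Spec_solution (day : Int) (k : Int) (out : List Int) : Prop := out = solution_alt day k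
instance (day : Int) (k : Int) (out : List Int) : Decidable (Spec_solution day k out) := by unfold Spec_solution; infer_instance

-- ===== CLAIM (what is proved, stated in full; the proofs are below) =====
def Claim_equal_solution : Prop := ∀ (day : Int) (k : Int), Dom_solution day k → Spec_solution day k (solution day k)

-- ===== LEMMAS AND PROOFS =====
-- Python '%' with positive divisor 7 is Lean's emod
theorem pymod7 (a : Int) : PySem.Int.mod a 7 = a % 7 :=
  PySem.Int.mod_eq_emod_of_pos (by norm_num)

-- A's fold output depends only on (first_day + diff) % 7
theorem fold_inv (ds : List Int) : ∀ (fd diff fd' diff' : Int) (acc : List Int),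
    (fd + diff) % 7 = (fd' + diff') % 7 →
    (ds.foldl (fun (st : Int × List Int) days =>
        (PySem.Int.mod (st.1 + days) 7,
         if PySem.Int.mod (st.1 + diff) 7 = 5 ∨ PySem.Int.mod (st.1 + diff) 7 = 6 then
           st.2 ++ [1]
         else
           st.2 ++ [0]))
      (fd, acc)).2
    = (ds.foldl (fun (st : Int × List Int) days =>
        (PySem.Int.mod (st.1 + days) 7,
         if PySem.Int.mod (st.1 + diff') 7 = 5 ∨ PySem.Int.mod (st.1 + diff') 7 = 6 then
           st.2 ++ [1]
         else
           st.2 ++ [0]))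
      (fd', acc)).2 := by
  induction ds with
  | nil => intro fd diff fd' diff' acc h; rfl
  | cons d t ih =>
    intro fd diff fd' diff' acc h
    simp only [List.foldl]
    have htest : PySem.Int.mod (fd + diff) 7 = PySem.Int.mod (fd' + diff') 7 := by
      simp only [pymod7]; exact h
    rw [htest]
    exact ih _ _ _ _ _ (by simp only [pymod7]; omega)

-- ===== VERDICT (by name: the statement is the Claim_ definition above) =====
theorem solution_spec : Claim_equal_solution := by
  intro day k _
  unfold Spec_solution
  simp only [solution, solution_alt]
  rw [fold_inv _ day (k - 1) ((day + k - 1) % 7) 0 [] (by omega)]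
  rw [pymod7]
  have h0 : 0 ≤ (day + k - 1) % 7 := Int.emod_nonneg _ (by norm_num)
  have h7 : (day + k - 1) % 7 < 7 := Int.emod_lt_of_pos _ (by norm_num)
  set m := (day + k - 1) % 7 with hm
  clear_value m
  interval_cases m <;> decide
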